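-- pv_equiv track=rewrite | github.com/fionap17/comp110-22s-workspace | exercises/ex08/data_utils.py | improved
-- ===== SOURCE A (Python) =====
-- def improved(table: dict[str, int], keys: list[str]) -> dict[str, int]:
--     """Summation of counts of a given list of keys and creates a new dictionary."""
--     new_dict: dict[str, int] = {}
--     new_dict["improve"] = 0
--     new_dict["not improve"] = 0
--     for answer in table:
--         if answer in keys:
--             new_dict["improve"] += table[answer]
--         else:
--             new_dict["not improve"] += table[answer]
--     return new_dict
-- ===== SOURCE B (Python) =====
-- def improved(table: dict[str, int], keys: list[str]) -> dict[str, int]: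
--     """Summation of counts of a given list of keys and creates a new dictionary."""
--     total = sum(table.values())
--     improve = sum(v for k, v in table.items() if k in keys)
--     return {"improve": improve, "not improve": total - improve}
-- ===== Notes on version B (the rewrite author's own statement) =====
-- stated objective: simpler
-- what changed: Replaces A's stateful loop with two accumulator cells and an else-branch by a single filtered comprehension sum for 'improve' plus sum(table.values()), deriving 'not improve' as the complement total - improve.
import Mathlib
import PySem

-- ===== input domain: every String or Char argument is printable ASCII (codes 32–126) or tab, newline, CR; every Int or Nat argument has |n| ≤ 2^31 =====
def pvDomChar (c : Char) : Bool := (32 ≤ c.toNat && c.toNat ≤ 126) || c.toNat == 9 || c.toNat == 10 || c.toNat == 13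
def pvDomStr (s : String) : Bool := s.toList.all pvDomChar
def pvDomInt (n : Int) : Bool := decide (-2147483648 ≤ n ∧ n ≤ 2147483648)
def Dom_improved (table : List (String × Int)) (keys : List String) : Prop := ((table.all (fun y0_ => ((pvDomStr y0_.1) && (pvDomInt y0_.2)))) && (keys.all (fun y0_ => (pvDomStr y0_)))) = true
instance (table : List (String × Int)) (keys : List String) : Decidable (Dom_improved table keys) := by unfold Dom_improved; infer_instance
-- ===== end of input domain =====

-- B replaces A's two-counter else-branch loop by a filtered sum plus complement (total - improve); simpler decomposition, same cost.

-- ===== PORT A =====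
-- table is a Python dict: PySem.Dict.ofList table is that dict; iterating 'for answer in table'
-- with 'table[answer]' visits each item (answer, p.2) of the dict (keys of a Dict are unique).
def improved (table : List (String × Int)) (keys : List String) : List (String × Int) :=
  let t := PySem.Dict.ofList table
  let new_dict : PySem.Dict String Int := PySem.Dict.empty
  let new_dict := new_dict.insert "improve" 0
  let new_dict := new_dict.insert "not improve" 0
  let new_dict := t.items.foldl (fun d p =>
    if p.1 ∈ keys then d.insert "improve" (d.getD "improve" 0 + p.2)
    else d.insert "not improve" (d.getD "not improve" 0 + p.2)) new_dict
  new_dict.items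

-- ===== PORT B =====
def improved_alt (table : List (String × Int)) (keys : List String) : List (String × Int) :=
  let t := PySem.Dict.ofList table
  let total := t.values.sum
  let improve := ((t.items.filter (fun p => p.1 ∈ keys)).map (·.2)).sum
  ((PySem.Dict.empty.insert "improve" improve).insert "not improve" (total - improve)).items

-- ===== PRECONDITION & SPEC =====
def Spec_improved (table : List (String × Int)) (keys : List String) (out : List (String × Int)) : Prop := out = improved_alt table keys
instance (table : List (String × Int)) (keys : List String) (out : List (String × Int)) : Decidable (Spec_improved table keys out) := by unfold Spec_improved; infer_instance

-- ===== CLAIM (what is proved, stated in full; the proofs are below) =====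
def Claim_equal_improved : Prop := ∀ (table : List (String × Int)) (keys : List String), Dom_improved table keys → Spec_improved table keys (improved table keys)

-- ===== LEMMAS AND PROOFS =====

-- A's loop on the two-key accumulator, characterised as two filtered sums.
theorem improved_loop (keys : List String) (l : List (String × Int)) :
    ∀ a b : Int,
      (l.foldl (fun d p =>
        if p.1 ∈ keys then d.insert "improve" (d.getD "improve" 0 + p.2)
        else d.insert "not improve" (d.getD "not improve" 0 + p.2))
        (PySem.Dict.mk [("improve", a), ("not improve", b)])).items
      = [("improve", a + ((l.filter (fun p => decide (p.1 ∈ keys))).map (·.2)).sum),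
         ("not improve", b + ((l.filter (fun p => !decide (p.1 ∈ keys))).map (·.2)).sum)] := by
  induction l with
  | nil => intro a b; simp
  | cons p rest ih =>
    intro a b
    by_cases h : p.1 ∈ keys
    · have hstep : ((PySem.Dict.mk [("improve", a), ("not improve", b)]).insert "improve"
          ((PySem.Dict.mk [("improve", a), ("not improve", b)]).getD "improve" 0 + p.2))
          = PySem.Dict.mk [("improve", a + p.2), ("not improve", b)] := by
        simp [PySem.Dict.insert, PySem.Dict.getD, PySem.Dict.get?, PySem.Dict.contains]
      rw [List.foldl_cons, if_pos h, hstep, ih]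
      simp [h, add_assoc]
    · have hstep : ((PySem.Dict.mk [("improve", a), ("not improve", b)]).insert "not improve"
          ((PySem.Dict.mk [("improve", a), ("not improve", b)]).getD "not improve" 0 + p.2))
          = PySem.Dict.mk [("improve", a), ("not improve", b + p.2)] := by
        simp [PySem.Dict.insert, PySem.Dict.getD, PySem.Dict.get?, PySem.Dict.contains]
      rw [List.foldl_cons, if_neg h, hstep, ih]
      simp [h, add_assoc]

theorem sum_split (l : List (String × Int)) (g : String × Int → Bool) :
    (l.map (·.2)).sum
      = ((l.filter g).map (·.2)).sum + ((l.filter (fun p => !g p)).map (·.2)).sum := by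
  induction l with
  | nil => simp
  | cons p rest ih =>
    by_cases h : g p <;> simp [h, ih] <;> ring

-- ===== VERDICT (by name: the statement is the Claim_ definition above) =====
theorem improved_spec : Claim_equal_improved := by
  intro table keys _
  unfold Spec_improved improved improved_alt
  have h0 : ((PySem.Dict.empty.insert "improve" (0:Int)).insert "not improve" 0)
      = PySem.Dict.mk [("improve", 0), ("not improve", 0)] := by decide
  simp only [h0, improved_loop keys (PySem.Dict.ofList table).items 0 0]
  have hv : (PySem.Dict.ofList table).values
      = (PySem.Dict.ofList table).items.map (·.2) := rfl
  rw [hv, sum_split ((PySem.Dict.ofList table).items) (fun p => decide (p.1 ∈ keys))]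
  have h1 : ∀ x y : Int, ((PySem.Dict.empty.insert "improve" x).insert "not improve" y).items
      = [("improve", x), ("not improve", y)] := by
    intro x y
    simp [PySem.Dict.insert, PySem.Dict.contains, PySem.Dict.empty]
  rw [h1]
  simp
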